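-- pv_equiv track=rewrite | github.com/Olga0205Kzk/Totum-LBS | mo_migrate/models/lead.py | get_partner_name
-- ===== SOURCE A (Python) =====
-- def get_partner_name(partner_name):
--     if partner_name.startswith('-') or partner_name.startswith(' ') or partner_name[0].isdigit():
--         partner_name = partner_name[1:]
--         if partner_name.startswith('-') or partner_name.startswith(' ') or partner_name[0].isdigit():
--             return get_partner_name(partner_name)
--         else:
--             return partner_name
--     else:
--         return partner_name
-- ===== SOURCE B (Python) =====
-- def get_partner_name(partner_name):
--     while partner_name and (partner_name[0] in '- ' or partner_name[0].isdigit()):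
--         partner_name = partner_name[1:]
--     return partner_name
-- ===== Notes on version B (the rewrite author's own statement) =====
-- stated objective: simpler
-- what changed: Replaces the recursion with its doubled strip-check by a single guarded while-loop that drops one leading '-'/' '/digit character per iteration.
-- outside the precondition, e.g. on get_partner_name('-'): A raises IndexError, B returns ''; on get_partner_name(' '): A raises IndexError, B returns ''
import Mathlib
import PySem

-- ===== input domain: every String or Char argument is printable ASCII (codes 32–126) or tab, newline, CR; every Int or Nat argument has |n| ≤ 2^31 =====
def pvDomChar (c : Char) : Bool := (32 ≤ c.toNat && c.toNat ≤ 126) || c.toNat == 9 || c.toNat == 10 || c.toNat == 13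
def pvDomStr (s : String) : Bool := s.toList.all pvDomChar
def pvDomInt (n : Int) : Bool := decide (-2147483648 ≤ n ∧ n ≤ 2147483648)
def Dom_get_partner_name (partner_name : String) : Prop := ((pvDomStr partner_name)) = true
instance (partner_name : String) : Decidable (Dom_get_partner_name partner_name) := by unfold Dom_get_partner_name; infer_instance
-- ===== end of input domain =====

-- B replaces A's recursion (with its doubled strip-check) by a single guarded while-loop; simpler, same cost.


-- ===== PORT A =====
-- A's condition "s.startswith('-') or s.startswith(' ') or s[0].isdigit()";
-- none = the s[0] IndexError on the empty string (excluded by Pre_).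
def condA (cs : List Char) : Option Bool :=
  if PySem.Chars.startswith cs ['-'] then some true
  else if PySem.Chars.startswith cs [' '] then some true
  else (PySem.List.pyGet? cs 0).map PySem.Chars.isdigit

theorem condA_true_ne_nil {cs : List Char} (h : condA cs = some true) : cs ≠ [] := by
  intro hnil; subst hnil; simp [condA, PySem.Chars.startswith, PySem.List.pyGet?, PySem.List.pyIdx?] at h

-- literal transliteration of A's recursion (strip one char, re-check, recurse)
def goA (cs : List Char) : List Char :=
  match h : condA cs with
  | some true =>
      let cs' := PySem.List.slice cs (some 1) none
      match condA cs' with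
      | some true => goA cs'
      | some false => cs'
      | none => []        -- IndexError in Python; unreachable under Pre_
  | some false => cs
  | none => []            -- IndexError in Python; unreachable under Pre_
termination_by cs.length
decreasing_by
  simp only [PySem.List.slice_from_one]
  have := condA_true_ne_nil h
  cases cs with
  | nil => exact absurd rfl this
  | cons c rest => simp

def get_partner_name (partner_name : String) : String :=
  String.ofList (goA partner_name.toList)

-- ===== PORT B =====
-- B's loop condition: "partner_name and (partner_name[0] in '- ' or partner_name[0].isdigit())"
def goB (cs : List Char) : List Char :=
  match cs with
  | [] => []
  | c :: rest =>
      if ['-', ' '].contains c || PySem.Chars.isdigit c then goB rest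
      else c :: rest

def get_partner_name_alt (partner_name : String) : String :=
  String.ofList (goB partner_name.toList)

-- ===== PRECONDITION & SPEC =====
-- A raises IndexError exactly when every character of the string is '-', ' ' or a digit
-- (including the empty string): Pre_ requires one character that is none of these.
def Pre_get_partner_name (partner_name : String) : Prop :=
  (partner_name.toList.any (fun c => !(c == '-' || c == ' ' || PySem.Chars.isdigit c))) = true
instance (partner_name : String) : Decidable (Pre_get_partner_name partner_name) := by
  unfold Pre_get_partner_name; infer_instance

def pvWitness_get_partner_name : String := "-- 12 Acme"

def Spec_get_partner_name (partner_name : String) (out : String) : Prop :=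
  out = get_partner_name_alt partner_name
instance (partner_name : String) (out : String) : Decidable (Spec_get_partner_name partner_name out) := by
  unfold Spec_get_partner_name; infer_instance

-- ===== CLAIM (what is proved, stated in full; the proofs are below) =====
def Claim_equal_get_partner_name : Prop := ∀ (partner_name : String), Dom_get_partner_name partner_name → Pre_get_partner_name partner_name → Spec_get_partner_name partner_name (get_partner_name partner_name)

-- ===== LEMMAS AND PROOFS =====

-- the one-character strip test both conditions compute on a nonempty string
def stripC (c : Char) : Bool := c == '-' || c == ' ' || PySem.Chars.isdigit c

theorem condA_cons (c : Char) (rest : List Char) : condA (c :: rest) = some (stripC c) := by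
  by_cases h1 : c = '-'
  · subst h1; simp [condA, stripC, PySem.Chars.startswith, List.isPrefixOf]
  · by_cases h2 : c = ' '
    · subst h2; simp [condA, stripC, PySem.Chars.startswith, List.isPrefixOf]
    · simp [condA, stripC, PySem.Chars.startswith, List.isPrefixOf, h1, h2,
        PySem.List.pyGet?, PySem.List.pyIdx?,
        show ¬('-' = c) from fun e => h1 e.symm, show ¬(' ' = c) from fun e => h2 e.symm]

theorem goB_cons (c : Char) (rest : List Char) :
    goB (c :: rest) = if stripC c then goB rest else c :: rest := by
  simp only [goB, stripC]
  by_cases h1 : c = '-' <;> by_cases h2 : c = ' ' <;> simp [h1, h2]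

theorem goA_eq_goB (cs : List Char)
    (h : cs.any (fun c => !stripC c) = true) : goA cs = goB cs := by
  induction cs with
  | nil => simp at h
  | cons c rest ih =>
    rw [goA, goB_cons, condA_cons]
    cases hc : stripC c with
    | false => simp
    | true =>
      -- rest still contains a non-strippable character
      have hrest : rest.any (fun c => !stripC c) = true := by
        simp only [List.any_cons, hc] at h; simpa using h
      have hne : rest ≠ [] := by
        intro hnil; rw [hnil] at hrest; simp at hrest
      simp only [PySem.List.slice_from_one, List.tail_cons]
      cases rest with
      | nil => exact absurd rfl hne
      | cons c2 r2 =>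
        rw [condA_cons]
        cases hc2 : stripC c2 with
        | false => simp [goB_cons, hc2]
        | true => simpa using ih hrest

-- ===== VERDICT (by name: the statement is the Claim_ definition above) =====
theorem get_partner_name_spec : Claim_equal_get_partner_name := by
  intro s _ hpre
  unfold Spec_get_partner_name get_partner_name get_partner_name_alt
  unfold Pre_get_partner_name at hpre
  have : s.toList.any (fun c => !stripC c) = true := hpre
  rw [goA_eq_goB _ this]
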